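-- pv_equiv track=rewrite | github.com/csysp/usnpw | usnpw/core/password_entropy.py | _char_space
-- ===== SOURCE A (Python) =====
-- import string
--
-- def _char_space(token: str) -> int:
--     if not token:
--         return 1
--     has_lower = any(ch in string.ascii_lowercase for ch in token)
--     has_upper = any(ch in string.ascii_uppercase for ch in token)
--     has_digit = any(ch in string.digits for ch in token)
--     has_symbol = any(ch in string.punctuation for ch in token)
--     has_other = any(
--         ch not in string.ascii_lowercase
--         and ch not in string.ascii_uppercase
--         and ch not in string.digits
--         and ch not in string.punctuation
--         for ch in token
--     )
--
--     space = 0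
--     if has_lower:
--         space += 26
--     if has_upper:
--         space += 26
--     if has_digit:
--         space += 10
--     if has_symbol:
--         space += 33
--     if has_other:
--         # Conservative extension for non-ASCII code points.
--         space += 100
--     return max(space, 1)
-- ===== SOURCE B (Python) =====
-- _SIZES = (26, 26, 10, 33, 100)
--
--
-- def _classify(ch):
--     if "a" <= ch <= "z":
--         return 0
--     if "A" <= ch <= "Z":
--         return 1
--     if "0" <= ch <= "9":
--         return 2
--     if "!" <= ch <= "~":
--         return 3  # remaining printable ASCII = punctuation
--     return 4
--
--
-- def _char_space(token: str) -> int: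
--     labels = {_classify(ch) for ch in token}
--     return max(sum(_SIZES[i] for i in labels), 1)
-- ===== Notes on version B (the rewrite author's own statement) =====
-- stated objective: simpler
-- what changed: Instead of five separate any(...) membership scans plus an if-chain that adds fixed amounts per flag, B maps each character to a class index in one pass, collects the distinct indices in a set, and sums a weight table over that set.
import Mathlib
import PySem

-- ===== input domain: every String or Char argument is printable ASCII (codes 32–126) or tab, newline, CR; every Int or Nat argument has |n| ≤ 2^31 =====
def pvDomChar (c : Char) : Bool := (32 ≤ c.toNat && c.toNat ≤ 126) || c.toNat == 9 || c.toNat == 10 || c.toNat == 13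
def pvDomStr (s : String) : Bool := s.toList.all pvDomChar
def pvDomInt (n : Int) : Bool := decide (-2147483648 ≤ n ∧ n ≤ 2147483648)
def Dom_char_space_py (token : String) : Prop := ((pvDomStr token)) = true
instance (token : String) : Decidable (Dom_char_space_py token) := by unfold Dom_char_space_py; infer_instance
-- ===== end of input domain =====

-- B replaces A's five membership scans and if-chain of additions by one classifying
-- pass building the set of class indices present, then a table sum (objective: simpler).

-- ===== PORT A =====
def pyAsciiLowercase : String := "abcdefghijklmnopqrstuvwxyz"
def pyAsciiUppercase : String := "ABCDEFGHIJKLMNOPQRSTUVWXYZ"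
def pyDigits : String := "0123456789"
def pyPunctuation : String := "!\"#$%&'()*+,-./:;<=>?@[\\]^_`{|}~"

def char_space_py (token : String) : Int :=
  if token.toList = [] then 1
  else
    let hasLower := token.toList.any (fun ch => pyAsciiLowercase.toList.contains ch)
    let hasUpper := token.toList.any (fun ch => pyAsciiUppercase.toList.contains ch)
    let hasDigit := token.toList.any (fun ch => pyDigits.toList.contains ch)
    let hasSymbol := token.toList.any (fun ch => pyPunctuation.toList.contains ch)
    let hasOther := token.toList.any (fun ch =>
      !pyAsciiLowercase.toList.contains ch
      && !pyAsciiUppercase.toList.contains ch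
      && !pyDigits.toList.contains ch
      && !pyPunctuation.toList.contains ch)
    let space : Int := 0
    let space := if hasLower then space + 26 else space
    let space := if hasUpper then space + 26 else space
    let space := if hasDigit then space + 10 else space
    let space := if hasSymbol then space + 33 else space
    let space := if hasOther then space + 100 else space
    max space 1

-- ===== PORT B =====
-- Python's "a" <= ch <= "z" compares code points; ported as bounds on Char.toNat (exact).
def classifyB (c : Char) : Int :=
  if 97 ≤ c.toNat ∧ c.toNat ≤ 122 then 0
  else if 65 ≤ c.toNat ∧ c.toNat ≤ 90 then 1
  else if 48 ≤ c.toNat ∧ c.toNat ≤ 57 then 2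
  else if 33 ≤ c.toNat ∧ c.toNat ≤ 126 then 3
  else 4

def sizesB : List Int := [26, 26, 10, 33, 100]

-- _SIZES[i]: the index is a classifyB value, always in range, so pyGet? never misses;
-- .getD 0 only totalises the lookup.
def char_space_py_alt (token : String) : Int :=
  max (((PySem.Set.ofList (token.toList.map classifyB) : PySem.Set Int).map
    (fun i => (PySem.List.pyGet? sizesB i).getD 0)).sum) 1

-- ===== PRECONDITION & SPEC =====
def Spec_char_space_py (token : String) (out : Int) : Prop := out = char_space_py_alt token
instance (token : String) (out : Int) : Decidable (Spec_char_space_py token out) := by unfold Spec_char_space_py; infer_instance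

-- ===== CLAIM =====
def Claim_equal_char_space_py : Prop := ∀ (token : String), Dom_char_space_py token → Spec_char_space_py token (char_space_py token)

-- ===== LEMMAS AND PROOFS =====

def isLowerB (c : Char) : Bool := 97 ≤ c.toNat && c.toNat ≤ 122
def isUpperB (c : Char) : Bool := 65 ≤ c.toNat && c.toNat ≤ 90
def isDigitB (c : Char) : Bool := 48 ≤ c.toNat && c.toNat ≤ 57
def isPunctB (c : Char) : Bool :=
  (33 ≤ c.toNat && c.toNat ≤ 47) || (58 ≤ c.toNat && c.toNat ≤ 64)
  || (91 ≤ c.toNat && c.toNat ≤ 96) || (123 ≤ c.toNat && c.toNat ≤ 126)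

-- membership in a char list enumerating a code-point range equals the range test on the code point
lemma contains_range_map (lo n : Nat) (hn : lo + n ≤ 55296) (c : Char) :
    (((List.range' lo n).map Char.ofNat).contains c) = (lo ≤ c.toNat && c.toNat < lo + n) := by
  simp only [List.contains_eq_mem]
  rw [show ((decide (lo ≤ c.toNat)) && (decide (c.toNat < lo + n))) = decide (lo ≤ c.toNat ∧ c.toNat < lo + n) by simp]
  apply decide_eq_decide.mpr
  simp only [List.mem_map, List.mem_range'_1]
  constructor
  · rintro ⟨m, ⟨h1, h2⟩, rfl⟩
    rw [Char.toNat_ofNat]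
    have hv : m.isValidChar := Or.inl (by omega)
    simp [hv]; omega
  · rintro ⟨h1, h2⟩
    exact ⟨c.toNat, ⟨h1, h2⟩, Char.ofNat_toNat c⟩

lemma contains_lower (c : Char) : pyAsciiLowercase.toList.contains c = isLowerB c := by
  rw [show pyAsciiLowercase.toList = (List.range' 97 26).map Char.ofNat by decide]
  rw [contains_range_map 97 26 (by omega) c]
  simp only [isLowerB]
  congr 1
  exact decide_eq_decide.mpr (by omega)

lemma contains_upper (c : Char) : pyAsciiUppercase.toList.contains c = isUpperB c := by
  rw [show pyAsciiUppercase.toList = (List.range' 65 26).map Char.ofNat by decide]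
  rw [contains_range_map 65 26 (by omega) c]
  simp only [isUpperB]
  congr 1
  exact decide_eq_decide.mpr (by omega)

lemma contains_digit (c : Char) : pyDigits.toList.contains c = isDigitB c := by
  rw [show pyDigits.toList = (List.range' 48 10).map Char.ofNat by decide]
  rw [contains_range_map 48 10 (by omega) c]
  simp only [isDigitB]
  congr 1
  exact decide_eq_decide.mpr (by omega)

lemma contains_punct (c : Char) : pyPunctuation.toList.contains c = isPunctB c := by
  rw [show pyPunctuation.toList =
      ((List.range' 33 15).map Char.ofNat) ++ ((List.range' 58 7).map Char.ofNat)
      ++ ((List.range' 91 6).map Char.ofNat) ++ ((List.range' 123 4).map Char.ofNat) by decide]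
  simp only [List.contains_append]
  rw [contains_range_map 33 15 (by omega) c, contains_range_map 58 7 (by omega) c,
      contains_range_map 91 6 (by omega) c, contains_range_map 123 4 (by omega) c]
  simp only [isPunctB]
  norm_num [Nat.lt_succ_iff]

-- classifyB's values characterised by the plain class predicates
lemma classify_eq_zero (c : Char) : classifyB c = 0 ↔ isLowerB c = true := by
  simp only [classifyB, isLowerB]; split_ifs <;> simp_all <;> omega

lemma classify_eq_one (c : Char) : classifyB c = 1 ↔ (!isLowerB c && isUpperB c) = true := by
  simp only [classifyB, isLowerB, isUpperB]; split_ifs <;> simp_all <;> omega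

lemma classify_eq_two (c : Char) :
    classifyB c = 2 ↔ (!isLowerB c && !isUpperB c && isDigitB c) = true := by
  simp only [classifyB, isLowerB, isUpperB, isDigitB]; split_ifs <;> simp_all <;> omega

lemma classify_eq_three (c : Char) :
    classifyB c = 3 ↔ (!isLowerB c && !isUpperB c && !isDigitB c && isPunctB c) = true := by
  simp only [classifyB, isLowerB, isUpperB, isDigitB, isPunctB]; split_ifs <;> simp_all <;> omega

lemma classify_eq_four (c : Char) :
    classifyB c = 4 ↔ (!isLowerB c && !isUpperB c && !isDigitB c && !isPunctB c) = true := by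
  simp only [classifyB, isLowerB, isUpperB, isDigitB, isPunctB]; split_ifs <;> simp_all <;> omega

lemma classify_mem_five (c : Char) : classifyB c ∈ ([0, 1, 2, 3, 4] : List Int) := by
  simp only [classifyB]; split_ifs <;> simp

-- the elif-chain predicates of A's "other" disjunct etc. coincide with the chained forms
lemma upper_chain (c : Char) : (!isLowerB c && isUpperB c) = isUpperB c := by
  cases h : isUpperB c <;> simp_all [isUpperB, isLowerB] <;> omega

lemma digit_chain (c : Char) : (!isLowerB c && !isUpperB c && isDigitB c) = isDigitB c := by
  cases h : isDigitB c <;> simp_all [isUpperB, isLowerB, isDigitB] <;> omega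

lemma punct_chain (c : Char) : (!isLowerB c && !isUpperB c && !isDigitB c && isPunctB c) = isPunctB c := by
  cases h : isPunctB c <;> simp_all [isUpperB, isLowerB, isDigitB, isPunctB] <;> omega

-- summing the weight table over any nodup list of class indices = per-class membership ifs
lemma sum_weights (s : List Int) (hn : s.Nodup) (hs : ∀ x ∈ s, x ∈ ([0, 1, 2, 3, 4] : List Int)) :
    (s.map (fun i => (PySem.List.pyGet? sizesB i).getD 0)).sum =
      (if (0 : Int) ∈ s then 26 else 0) + (if (1 : Int) ∈ s then 26 else 0)
      + (if (2 : Int) ∈ s then 10 else 0) + (if (3 : Int) ∈ s then 33 else 0)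
      + (if (4 : Int) ∈ s then 100 else 0) := by
  have h2 : (([0, 1, 2, 3, 4] : List Int).filter (fun x => decide (x ∈ s))).Nodup :=
    List.Nodup.filter _ (by decide)
  have hp : s.Perm (([0, 1, 2, 3, 4] : List Int).filter (fun x => decide (x ∈ s))) := by
    rw [List.perm_ext_iff_of_nodup hn h2]
    intro a
    simp only [List.mem_filter, decide_eq_true_eq]
    exact ⟨fun h => ⟨hs a h, h⟩, fun h => h.2⟩
  rw [(hp.map _).sum_eq]
  by_cases h0 : (0 : Int) ∈ s <;> by_cases h1 : (1 : Int) ∈ s <;> by_cases h2 : (2 : Int) ∈ s <;>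
    by_cases h3 : (3 : Int) ∈ s <;> by_cases h4 : (4 : Int) ∈ s <;>
    simp [List.filter, h0, h1, h2, h3, h4, PySem.List.pyGet?, PySem.List.pyIdx?, sizesB]

-- membership of a class index in B's set = an any-scan of the class predicate over the token
lemma mem_set_iff (l : List Char) (k : Int) (p : Char → Bool)
    (hk : ∀ c, classifyB c = k ↔ p c = true) :
    (k ∈ PySem.Set.ofList (l.map classifyB)) ↔ l.any p = true := by
  rw [PySem.Set.mem_ofList]
  simp only [List.mem_map, List.any_eq_true]
  constructor
  · rintro ⟨c, hc, hck⟩; exact ⟨c, hc, (hk c).mp hck⟩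
  · rintro ⟨c, hc, hpc⟩; exact ⟨c, hc, (hk c).mpr hpc⟩

-- ===== VERDICT =====
theorem char_space_py_spec : Claim_equal_char_space_py := by
  intro token _
  show char_space_py token = char_space_py_alt token
  unfold char_space_py char_space_py_alt
  rw [sum_weights _ (PySem.Set.nodup_ofList _)
    (by intro x hx
        rw [PySem.Set.mem_ofList] at hx
        obtain ⟨c, _, rfl⟩ := List.mem_map.mp hx
        exact classify_mem_five c)]
  simp only [mem_set_iff _ _ _ classify_eq_zero, mem_set_iff _ _ _ classify_eq_one,
    mem_set_iff _ _ _ classify_eq_two, mem_set_iff _ _ _ classify_eq_three,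
    mem_set_iff _ _ _ classify_eq_four,
    contains_lower, contains_upper, contains_digit, contains_punct,
    upper_chain, digit_chain, punct_chain]
  generalize token.toList = l
  rcases l with _ | ⟨x, xs⟩
  · simp
  · rw [if_neg (by simp)]
    generalize (x :: xs).any isLowerB = b1
    generalize (x :: xs).any isUpperB = b2
    generalize (x :: xs).any isDigitB = b3
    generalize (x :: xs).any isPunctB = b4
    generalize (x :: xs).any (fun c => !isLowerB c && !isUpperB c && !isDigitB c && !isPunctB c) = b5
    cases b1 <;> cases b2 <;> cases b3 <;> cases b4 <;> cases b5 <;> decide
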